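-- pv_equiv track=rewrite | github.com/KorkmazPolat/bitaksi | scripts/run_full_evaluation.py | aliases_to_ids
-- ===== SOURCE A (Python) =====
-- def aliases_to_ids(expected_docs: list[str], doc_map: dict[str, str]) -> list[str]:
--     known_ids = set(doc_map.values())
--     out: list[str] = []
--     for val in expected_docs:
--         if val in doc_map:
--             out.append(doc_map[val])
--         elif val in known_ids:
--             out.append(val)
--     return out
-- ===== SOURCE B (Python) =====
-- def aliases_to_ids(expected_docs: list[str], doc_map: dict[str, str]) -> list[str]:
--     # Inverted index: place answers by position, scanning the map instead of per-element lookups.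
--     positions: dict[str, list[int]] = {}
--     for i, val in enumerate(expected_docs):
--         positions.setdefault(val, []).append(i)
--     out = [None] * len(expected_docs)
--     for v in doc_map.values():          # identity pass: canonical ids map to themselves
--         for i in positions.get(v, []):
--             out[i] = v
--     for k, v in doc_map.items():        # alias pass afterwards, so aliases take precedence
--         for i in positions.get(k, []):
--             out[i] = v
--     return [x for x in out if x is not None]
-- ===== Notes on version B (the rewrite author's own statement) =====
-- stated objective: alternative
-- what changed: B inverts the traversal: it builds a positions index (value -> list of indices in expected_docs), allocates an output slot per position, fills slots by scanning the map's values (identity pass) and then its items (alias pass, overriding), and finally drops the empty slots - instead of A's per-element dict/set membership tests.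
import Mathlib
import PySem

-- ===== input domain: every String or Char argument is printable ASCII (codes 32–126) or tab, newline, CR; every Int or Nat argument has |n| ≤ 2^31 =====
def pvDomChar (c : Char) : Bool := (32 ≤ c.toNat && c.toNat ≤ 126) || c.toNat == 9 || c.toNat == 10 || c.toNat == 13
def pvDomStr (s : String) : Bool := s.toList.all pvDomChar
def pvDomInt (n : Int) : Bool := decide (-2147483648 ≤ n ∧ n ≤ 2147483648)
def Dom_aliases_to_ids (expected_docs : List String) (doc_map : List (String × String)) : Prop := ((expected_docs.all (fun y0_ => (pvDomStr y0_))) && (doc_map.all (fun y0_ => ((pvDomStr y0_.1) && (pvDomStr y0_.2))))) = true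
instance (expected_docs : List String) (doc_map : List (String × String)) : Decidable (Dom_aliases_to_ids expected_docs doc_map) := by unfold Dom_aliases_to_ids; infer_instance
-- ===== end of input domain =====

-- B replaces A's per-element lookup pass by an inverted positions index: it scans the
-- MAP (identity pass, then alias pass) and writes answers into an output slot per position
-- (alternative algorithm of the same cost).

-- ===== PORT A =====
-- A: known_ids = set(doc_map.values()); for val: if key → doc_map[val], elif known id → val.
def aliases_to_ids (expected_docs : List String) (doc_map : List (String × String)) : List String :=
  let d := PySem.Dict.ofList doc_map
  let known_ids := PySem.Set.ofList d.values
  expected_docs.foldl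
    (fun out val =>
      if d.contains val then out ++ [d.getD val ""]
      else if val ∈ known_ids then out ++ [val]
      else out)
    []

-- ===== PORT B =====
-- B: build positions[val] = list of indices; out = [None]*n; identity pass over values,
-- then alias pass over items writes out[i]; finally drop the Nones.
-- (out[i] = v is PySem.List.pySetD: exact here since every stored index is in range.)
def aliases_to_ids_alt (expected_docs : List String) (doc_map : List (String × String)) : List String :=
  let d := PySem.Dict.ofList doc_map
  let positions : PySem.Dict String (List Int) :=
    (PySem.List.enumerate expected_docs 0).foldl
      (fun p iv => p.insert iv.2 (p.getD iv.2 [] ++ [iv.1])) PySem.Dict.empty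
  let out0 : List (Option String) := List.replicate expected_docs.length none
  let out1 := d.values.foldl
    (fun o v => (positions.getD v []).foldl (fun o i => PySem.List.pySetD o i (some v)) o) out0
  let out2 := d.items.foldl
    (fun o kv => (positions.getD kv.1 []).foldl (fun o i => PySem.List.pySetD o i (some kv.2)) o) out1
  out2.filterMap id

-- ===== PRECONDITION & SPEC =====
def Spec_aliases_to_ids (expected_docs : List String) (doc_map : List (String × String)) (out : List String) : Prop := out = aliases_to_ids_alt expected_docs doc_map
instance (expected_docs : List String) (doc_map : List (String × String)) (out : List String) : Decidable (Spec_aliases_to_ids expected_docs doc_map out) := by unfold Spec_aliases_to_ids; infer_instance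

-- ===== CLAIM (what is proved, stated in full; the proofs are below) =====
def Claim_equal_aliases_to_ids : Prop := ∀ (expected_docs : List String) (doc_map : List (String × String)), Dom_aliases_to_ids expected_docs doc_map → Spec_aliases_to_ids expected_docs doc_map (aliases_to_ids expected_docs doc_map)

-- ===== LEMMAS AND PROOFS =====

-- The positions-building fold: getD v is the start value ++ the indices whose entry is v.
theorem pos_fold (l : List (Int × String)) (p : PySem.Dict String (List Int)) (v : String) :
    (l.foldl (fun p iv => p.insert iv.2 (p.getD iv.2 [] ++ [iv.1])) p).getD v [] =
      p.getD v [] ++ (l.filter (fun q => q.2 == v)).map Prod.fst := by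
  induction l generalizing p with
  | nil => simp
  | cons iv l ih =>
    simp only [List.foldl_cons, ih, List.filter_cons]
    by_cases h : v = iv.2
    · simp [h]
    · simp [PySem.Dict.getD_insert, h, (Ne.symm h : iv.2 ≠ v)]

-- Membership in positions.getD val []: exactly the in-range indices j with expected[j] = val.
theorem mem_positions (es : List String) (v : String) (i : Int) :
    i ∈ ((PySem.List.enumerate es 0).foldl
          (fun p iv => p.insert iv.2 (p.getD iv.2 [] ++ [iv.1])) PySem.Dict.empty).getD v [] ↔
      ∃ (k : Nat) (h : k < es.length), i = (k : Int) ∧ es[k] = v := by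
  rw [pos_fold]
  simp only [PySem.Dict.getD, PySem.Dict.get?_empty, Option.getD_none, List.nil_append,
    List.mem_map, List.mem_filter]
  constructor
  · rintro ⟨q, ⟨hq, hv⟩, rfl⟩
    obtain ⟨k, hk, rfl⟩ := (PySem.List.mem_enumerate_iff _ _ _).mp hq
    exact ⟨k, hk, by simpa using (beq_iff_eq.mp hv)⟩
  · rintro ⟨k, hk, rfl, hv⟩
    exact ⟨((k : Int), es[k]), ⟨(PySem.List.mem_enumerate_iff _ _ _).mpr ⟨k, hk, by simp⟩,
      beq_iff_eq.mpr hv⟩, rfl⟩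

-- The inner write loop over a list of nonnegative indices, read back at position j.
theorem setfold_getElem? (l : List Int) (w : Option String) (o : List (Option String))
    (hl : ∀ i ∈ l, 0 ≤ i) (j : Nat) :
    (l.foldl (fun o i => PySem.List.pySetD o i w) o)[j]? =
      if ((j : Int) ∈ l ∧ j < o.length) then some w else o[j]? := by
  induction l generalizing o with
  | nil => simp
  | cons i l ih =>
    have hi : 0 ≤ i := hl i (by simp)
    have hset : PySem.List.pySetD o i w = o.set i.toNat w := PySem.List.pySetD_of_nonneg o w hi
    have hlen : (o.set i.toNat w).length = o.length := by simp
    simp only [List.foldl_cons, ih _ (fun x hx => hl x (by simp [hx])), hset, hlen, List.mem_cons]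
    by_cases hjl : (j : Int) ∈ l
    · by_cases hj : j < o.length <;> simp [hjl, hj]
    · by_cases hij : i = (j : Int)
      · have ht : i.toNat = j := by omega
        by_cases hj : j < o.length
        · simp [hjl, hij, hj]
        · simp [hjl, hij, hj]
      · have ht : i.toNat ≠ j := by omega
        simp [hjl, ht]
        exact fun h1 _ => absurd h1.symm hij

theorem setfold_length (l : List Int) (w : Option String) (o : List (Option String)) :
    (l.foldl (fun o i => PySem.List.pySetD o i w) o).length = o.length := by
  induction l generalizing o with
  | nil => rfl
  | cons i l ih => simp [List.foldl_cons, ih, PySem.List.length_pySetD]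

-- The identity pass: slot j holds some es[j] iff es[j] occurs among the scanned values.
theorem valfold_getElem? (es : List String) (vs : List String) (o : List (Option String))
    (ho : o.length = es.length) (j : Nat) (hj : j < es.length) :
    (vs.foldl (fun o v =>
        (((PySem.List.enumerate es 0).foldl
            (fun p iv => p.insert iv.2 (p.getD iv.2 [] ++ [iv.1])) PySem.Dict.empty).getD v []).foldl
          (fun o i => PySem.List.pySetD o i (some v)) o) o)[j]? =
      if es[j] ∈ vs then some (some es[j]) else o[j]? := by
  induction vs generalizing o with
  | nil => simp
  | cons v vs ih =>
    have hnn : ∀ i ∈ ((PySem.List.enumerate es 0).foldl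
        (fun p iv => p.insert iv.2 (p.getD iv.2 [] ++ [iv.1])) PySem.Dict.empty).getD v [], 0 ≤ i := by
      intro i hi
      obtain ⟨k, hk, rfl, _⟩ := (mem_positions es v i).mp hi
      exact Int.natCast_nonneg k
    have hiff : ((j : Int) ∈ ((PySem.List.enumerate es 0).foldl
        (fun p iv => p.insert iv.2 (p.getD iv.2 [] ++ [iv.1])) PySem.Dict.empty).getD v []) ↔
        es[j] = v := by
      rw [mem_positions]
      constructor
      · rintro ⟨k, hk, hjk, hkv⟩
        have : j = k := by exact_mod_cast hjk
        exact this ▸ hkv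
      · intro hv
        exact ⟨j, hj, rfl, hv⟩
    have key := ih ((((PySem.List.enumerate es 0).foldl
        (fun p iv => p.insert iv.2 (p.getD iv.2 [] ++ [iv.1])) PySem.Dict.empty).getD v []).foldl
      (fun o i => PySem.List.pySetD o i (some v)) o) (by rw [setfold_length]; exact ho)
    simp only [List.foldl_cons]
    rw [key, setfold_getElem? _ _ _ hnn]
    have hjo : j < o.length := by omega
    simp only [hiff, List.mem_cons]
    by_cases hm : es[j] ∈ vs
    · simp [hm]
    · by_cases hv : es[j] = v
      · simp [hv, hjo]
      · simp [hm, hv]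

-- The alias pass over key-value pairs with distinct keys: the (unique) matching key wins.
theorem itemfold_getElem? (es : List String) (kvs : List (String × String))
    (hnd : (kvs.map Prod.fst).Nodup) (o : List (Option String))
    (ho : o.length = es.length) (j : Nat) (hj : j < es.length) :
    (kvs.foldl (fun o kv =>
        (((PySem.List.enumerate es 0).foldl
            (fun p iv => p.insert iv.2 (p.getD iv.2 [] ++ [iv.1])) PySem.Dict.empty).getD kv.1 []).foldl
          (fun o i => PySem.List.pySetD o i (some kv.2)) o) o)[j]? =
      match (PySem.Dict.mk kvs).get? es[j] with
      | some v => some (some v)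
      | none => o[j]? := by
  induction kvs generalizing o with
  | nil => simp [PySem.Dict.get?]
  | cons kv kvs ih =>
    obtain ⟨k, v⟩ := kv
    simp only [List.map_cons, List.nodup_cons] at hnd
    have hnn : ∀ i ∈ ((PySem.List.enumerate es 0).foldl
        (fun p iv => p.insert iv.2 (p.getD iv.2 [] ++ [iv.1])) PySem.Dict.empty).getD k [], 0 ≤ i := by
      intro i hi
      obtain ⟨m, hm, rfl, _⟩ := (mem_positions es k i).mp hi
      exact Int.natCast_nonneg m
    have hiff : ((j : Int) ∈ ((PySem.List.enumerate es 0).foldl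
        (fun p iv => p.insert iv.2 (p.getD iv.2 [] ++ [iv.1])) PySem.Dict.empty).getD k []) ↔
        es[j] = k := by
      rw [mem_positions]
      constructor
      · rintro ⟨m, hm, hjm, hmk⟩
        have : j = m := by exact_mod_cast hjm
        exact this ▸ hmk
      · intro hv
        exact ⟨j, hj, rfl, hv⟩
    have key := ih hnd.2 ((((PySem.List.enumerate es 0).foldl
        (fun p iv => p.insert iv.2 (p.getD iv.2 [] ++ [iv.1])) PySem.Dict.empty).getD k []).foldl
      (fun o i => PySem.List.pySetD o i (some v)) o) (by rw [setfold_length]; exact ho)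
    simp only [List.foldl_cons]
    rw [key, setfold_getElem? _ _ _ hnn]
    have hjo : j < o.length := by omega
    by_cases hk : es[j] = k
    · subst hk
      have hrest : (PySem.Dict.mk kvs).get? es[j] = none := by
        rw [PySem.Dict.get?_eq_none_iff_not_mem_keys]
        simpa [PySem.Dict.keys] using hnd.1
      simp [PySem.Dict.get?_mk_cons, hrest, hiff, hjo]
    · have hb : (k == es[j]) = false := beq_eq_false_iff_ne.mpr (fun he => hk he.symm)
      rcases hq : (PySem.Dict.mk kvs).get? es[j] with _ | v'
      · simp [PySem.Dict.get?_mk_cons, hq, hb, hiff, hk]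
      · simp [PySem.Dict.get?_mk_cons, hq, hb]

-- A's fold with accumulator equals acc ++ a filterMap pass (characterisation of A).
theorem foldl_eq_filterMap (d : PySem.Dict String String) (es : List String) (acc : List String) :
    es.foldl
      (fun out val =>
        if d.contains val then out ++ [d.getD val ""]
        else if val ∈ PySem.Set.ofList d.values then out ++ [val] else out) acc =
    acc ++ es.filterMap (fun val =>
      if d.contains val then d.get? val
      else if val ∈ PySem.Set.ofList d.values then some val else none) := by
  induction es generalizing acc with
  | nil => simp
  | cons v es ih =>
    simp only [List.foldl_cons, List.filterMap_cons, ih]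
    by_cases hc : d.contains v = true
    · rw [PySem.Dict.contains_eq_isSome_get?] at hc
      obtain ⟨w, hw⟩ := Option.isSome_iff_exists.mp hc
      have hgd : d.getD v "" = w := by rw [PySem.Dict.getD_eq_get?_getD, hw]; rfl
      simp [PySem.Dict.contains_eq_isSome_get?, hw, hgd]
    · by_cases hm : v ∈ PySem.Set.ofList d.values
      · simp [hc, hm]
      · simp [hc, hm]

theorem valfold_length (es vs : List String) (o : List (Option String)) :
    (vs.foldl (fun o v =>
        (((PySem.List.enumerate es 0).foldl
            (fun p iv => p.insert iv.2 (p.getD iv.2 [] ++ [iv.1])) PySem.Dict.empty).getD v []).foldl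
          (fun o i => PySem.List.pySetD o i (some v)) o) o).length = o.length := by
  induction vs generalizing o with
  | nil => rfl
  | cons v vs ih => simp only [List.foldl_cons]; rw [ih, setfold_length]

theorem itemfold_length (es : List String) (kvs : List (String × String)) (o : List (Option String)) :
    (kvs.foldl (fun o kv =>
        (((PySem.List.enumerate es 0).foldl
            (fun p iv => p.insert iv.2 (p.getD iv.2 [] ++ [iv.1])) PySem.Dict.empty).getD kv.1 []).foldl
          (fun o i => PySem.List.pySetD o i (some kv.2)) o) o).length = o.length := by
  induction kvs generalizing o with
  | nil => rfl
  | cons kv kvs ih => simp only [List.foldl_cons]; rw [ih, setfold_length]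

-- ===== VERDICT (by name: the statement is the Claim_ definition above) =====
theorem aliases_to_ids_spec : Claim_equal_aliases_to_ids := by
  intro es dm _
  unfold Spec_aliases_to_ids aliases_to_ids aliases_to_ids_alt
  simp only []
  rw [foldl_eq_filterMap, List.nil_append]
  set d := PySem.Dict.ofList dm with hd
  have hnd : (d.items.map Prod.fst).Nodup := PySem.Dict.nodup_keys_ofList dm
  have hmk : PySem.Dict.mk d.items = d := rfl
  -- B's filled slot list equals es mapped through A's per-element selector
  have hmain : (d.items.foldl (fun o kv =>
      (((PySem.List.enumerate es 0).foldl
          (fun p iv => p.insert iv.2 (p.getD iv.2 [] ++ [iv.1])) PySem.Dict.empty).getD kv.1 []).foldl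
        (fun o i => PySem.List.pySetD o i (some kv.2)) o)
      (d.values.foldl (fun o v =>
        (((PySem.List.enumerate es 0).foldl
            (fun p iv => p.insert iv.2 (p.getD iv.2 [] ++ [iv.1])) PySem.Dict.empty).getD v []).foldl
          (fun o i => PySem.List.pySetD o i (some v)) o)
        (List.replicate es.length none))) =
      es.map (fun val =>
        if d.contains val then d.get? val
        else if val ∈ PySem.Set.ofList d.values then some val else none) := by
    apply List.ext_getElem?
    intro j
    by_cases hj : j < es.length
    · rw [itemfold_getElem? es d.items hnd _ (by rw [valfold_length]; simp) j hj,
        valfold_getElem? es d.values _ (by simp) j hj, hmk]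
      rcases hq : d.get? es[j] with _ | v
      · have hc : d.contains es[j] = false := by
          rw [PySem.Dict.contains_eq_isSome_get?, hq]; rfl
        by_cases hv : es[j] ∈ d.values
        · simp [hc, hv, PySem.Set.mem_ofList, hj]
        · simp [hc, hv, PySem.Set.mem_ofList, hj]
      · have hc : d.contains es[j] = true := by
          rw [PySem.Dict.contains_eq_isSome_get?, hq]; rfl
        simp [hq, hc, hj]
    · have h1 : ¬ j < (es.map (fun val =>
        if d.contains val then d.get? val
        else if val ∈ PySem.Set.ofList d.values then some val else none)).length := by
        simpa using hj
      rw [List.getElem?_eq_none (by omega : (es.map _).length ≤ j)]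
      rw [List.getElem?_eq_none]
      rw [itemfold_length, valfold_length]
      simp; omega
  rw [hmain, List.filterMap_map]
  rfl
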